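-- pv_equiv track=rewrite | github.com/ekzm8523/CodingTestPractice | python/programmers/dp/42895.py | solution
-- ===== SOURCE A (Python) =====
-- def solution(N, number):
--     if N == number:
--         return 1
--     dp = [None] + [set() for _ in range(8)]
--
--     dp[1].add(N)
--
--     for i in range(2, 9):
--         dp[i].add(int(str(N) * i))  # i == 2 , N == 5 -> 55
--
--         for j in range(1, i):
--             for num1 in dp[j]:
--                 for num2 in dp[i-j]:
--                     dp[i].add(num1 * num2)
--                     if num2 != 0:
--                         dp[i].add(num1 // num2)
--                     dp[i].add(num1 + num2)
--                     dp[i].add(num1 - num2)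
--
--         if number in dp[i]:
--             return i
--     return -1
-- ===== SOURCE B (Python) =====
-- def solution(N, number):
--     # top-down: reach(k) = set of values expressible with exactly k copies of N
--     memo = {}
--
--     def reach(k):
--         if k in memo:
--             return memo[k]
--         if k == 1:
--             s = {N}
--         else:
--             s = {int(str(N) * k)}
--             for j in range(1, k):
--                 for a in reach(j):
--                     for b in reach(k - j):
--                         s.update((a + b, a - b, a * b))
--                         if b != 0:
--                             s.add(a // b)
--         memo[k] = s
--         return s
--
--     for k in range(1, 9):
--         if number in reach(k):
--             return k
--     return -1
-- ===== Notes on version B (the rewrite author's own statement) =====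
-- stated objective: alternative
-- what changed: Replaces A's bottom-up 9-slot dp table with early return inside the build loop by a top-down memoized recursion reach(k) (set of values from exactly k copies of N) plus a separate search loop over k=1..8, which also absorbs A's special-cased N==number check as the k=1 step.
import Mathlib
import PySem

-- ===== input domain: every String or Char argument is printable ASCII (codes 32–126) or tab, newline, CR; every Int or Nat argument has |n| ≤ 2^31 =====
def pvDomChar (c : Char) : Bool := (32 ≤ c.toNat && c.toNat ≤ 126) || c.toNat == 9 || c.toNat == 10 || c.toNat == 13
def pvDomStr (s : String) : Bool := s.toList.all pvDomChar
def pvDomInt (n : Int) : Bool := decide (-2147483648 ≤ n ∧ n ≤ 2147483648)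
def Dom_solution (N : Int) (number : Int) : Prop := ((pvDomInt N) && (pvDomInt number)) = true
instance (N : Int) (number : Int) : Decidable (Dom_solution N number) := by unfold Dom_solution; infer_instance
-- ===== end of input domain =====

-- B replaces A's bottom-up 9-slot dp table (with the early return inside the build loop and
-- a special-cased N == number check) by a top-down memoized recursion reach(k) plus a separate
-- search loop over k = 1..8; same return values, objective: alternative.

-- ===== PORT A =====
-- int(str(N) * i); the .getD 0 default is unreachable inside Pre_ (there 0 ≤ N, parsing succeeds)
def pvRep (N : Int) (i : Int) : Int :=
  (PySem.Int.ofChars? (PySem.List.pyRepeat (PySem.Int.toChars N) i)).getD 0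

-- A's inner double loop: for num1 in dp[j]: for num2 in dp[i-j]: add *, // (if num2 != 0), +, -
def pvCombA (s : PySem.Set Int) (s1 s2 : List Int) : PySem.Set Int :=
  s1.foldl (fun s num1 =>
    s2.foldl (fun s num2 =>
      let s := PySem.Set.add s (num1 * num2)
      let s := if num2 ≠ 0 then PySem.Set.add s (PySem.Int.floordiv num1 num2) else s
      let s := PySem.Set.add s (num1 + num2)
      PySem.Set.add s (num1 - num2)) s) s

-- dp[0] = None is never read (j and i-j range over 1..i-1); it is modeled as the empty set
def solution (N : Int) (number : Int) : Int :=
  if N = number then 1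
  else
    let dp : List (PySem.Set Int) := PySem.Set.empty :: List.replicate 8 PySem.Set.empty
    let dp := PySem.List.pySetD dp 1
      (PySem.Set.add (PySem.List.pyGetD dp 1 PySem.Set.empty) N)
    let st := (PySem.List.pyRange 2 9 1).foldl
      (fun (st : List (PySem.Set Int) × Option Int) i =>
        match st with
        | (dp, some r) => (dp, some r)
        | (dp, none) =>
          let si := PySem.Set.add (PySem.List.pyGetD dp i PySem.Set.empty) (pvRep N i)
          let si := (PySem.List.pyRange 1 i 1).foldl
            (fun si j => pvCombA si (PySem.List.pyGetD dp j PySem.Set.empty)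
                                    (PySem.List.pyGetD dp (i - j) PySem.Set.empty)) si
          let dp := PySem.List.pySetD dp i si
          if PySem.Set.contains (PySem.List.pyGetD dp i PySem.Set.empty) number
          then (dp, some i) else (dp, none))
      (dp, none)
    match st.2 with
    | some r => r
    | none => -1

-- ===== PORT B =====
-- B's inner double loop: s.update((a+b, a-b, a*b)); if b != 0: s.add(a//b)
def pvCombB (s : PySem.Set Int) (s1 s2 : List Int) : PySem.Set Int :=
  s1.foldl (fun s a =>
    s2.foldl (fun s b =>
      let s := PySem.Set.update s [a + b, a - b, a * b]
      if b ≠ 0 then PySem.Set.add s (PySem.Int.floordiv a b) else s) s) s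

-- reach(k): values expressible with exactly k copies of N (the memo dict in Source B only caches
-- these same values; the recursion itself is ported directly)
def pvReach (N : Int) : Nat → PySem.Set Int
  | 0 => PySem.Set.empty
  | 1 => PySem.Set.add PySem.Set.empty N
  | k + 2 =>
    (List.range' 1 (k + 1)).attach.foldl
      (fun s j => pvCombB s (pvReach N j.1) (pvReach N (k + 2 - j.1)))
      (PySem.Set.add PySem.Set.empty (pvRep N ((k : Int) + 2)))
  termination_by k => k
  decreasing_by
  · have := j.2; rw [List.mem_range'_1] at this; omega
  · have := j.2; rw [List.mem_range'_1] at this; omega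

def solution_alt (N : Int) (number : Int) : Int :=
  match (PySem.List.pyRange 1 9 1).foldl
    (fun (r : Option Int) k =>
      match r with
      | some r => some r
      | none => if PySem.Set.contains (pvReach N k.toNat) number then some k else none)
    none with
  | some r => r
  | none => -1

-- ===== PRECONDITION & SPEC =====
-- Pre_ excludes N < 0 with N ≠ number: there int(str(N)*i) is reached and both A and B raise
-- ValueError ('-3-3' is not an int literal); on every other input A returns normally.
def Pre_solution (N : Int) (number : Int) : Prop := 0 ≤ N ∨ N = number
instance (N : Int) (number : Int) : Decidable (Pre_solution N number) := by
  unfold Pre_solution; infer_instance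
def pvWitness_solution : Int × Int := (5, 12)

def Spec_solution (N : Int) (number : Int) (out : Int) : Prop := out = solution_alt N number
instance (N : Int) (number : Int) (out : Int) : Decidable (Spec_solution N number out) := by
  unfold Spec_solution; infer_instance

-- ===== CLAIM (what is proved, stated in full; the proofs are below) =====
def Claim_equal_solution : Prop := ∀ (N : Int) (number : Int), Dom_solution N number →
  Pre_solution N number → Spec_solution N number (solution N number)

-- ===== LEMMAS AND PROOFS =====

-- the four candidate values one pair (a, b) contributes (the same for both programs)
def pvP (a b x : Int) : Prop :=
  x = a * b ∨ (b ≠ 0 ∧ x = PySem.Int.floordiv a b) ∨ x = a + b ∨ x = a - b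

theorem mem_innerA (a : Int) (s2 : List Int) (s : PySem.Set Int) (x : Int) :
    x ∈ s2.foldl (fun s num2 =>
      let s := PySem.Set.add s (a * num2)
      let s := if num2 ≠ 0 then PySem.Set.add s (PySem.Int.floordiv a num2) else s
      let s := PySem.Set.add s (a + num2)
      PySem.Set.add s (a - num2)) s ↔ x ∈ s ∨ ∃ b ∈ s2, pvP a b x := by
  induction s2 generalizing s with
  | nil => simp
  | cons b t ih =>
    simp only [List.foldl_cons, ih]
    by_cases hb : b = 0 <;>
      simp [pvP, PySem.Set.mem_add, hb, or_assoc]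

theorem mem_pvCombA (s : PySem.Set Int) (s1 s2 : List Int) (x : Int) :
    x ∈ pvCombA s s1 s2 ↔ x ∈ s ∨ ∃ a ∈ s1, ∃ b ∈ s2, pvP a b x := by
  unfold pvCombA
  induction s1 generalizing s with
  | nil => simp
  | cons a t ih =>
    simp only [List.foldl_cons, ih, mem_innerA, List.mem_cons, or_assoc]
    constructor
    · rintro (h | h | h)
      · exact Or.inl h
      · exact Or.inr ⟨a, Or.inl rfl, h.choose, h.choose_spec⟩
      · obtain ⟨a', ha', rest⟩ := h
        exact Or.inr ⟨a', Or.inr ha', rest⟩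
    · rintro (h | ⟨a', (rfl | ha'), rest⟩)
      · exact Or.inl h
      · exact Or.inr (Or.inl rest)
      · exact Or.inr (Or.inr ⟨a', ha', rest⟩)

theorem mem_innerB (a : Int) (s2 : List Int) (s : PySem.Set Int) (x : Int) :
    x ∈ s2.foldl (fun s b =>
      let s := PySem.Set.update s [a + b, a - b, a * b]
      if b ≠ 0 then PySem.Set.add s (PySem.Int.floordiv a b) else s) s ↔
      x ∈ s ∨ ∃ b ∈ s2, pvP a b x := by
  induction s2 generalizing s with
  | nil => simp
  | cons b t ih =>
    simp only [List.foldl_cons, ih]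
    by_cases hb : b = 0 <;>
      simp [pvP, PySem.Set.mem_add, hb, or_assoc, or_left_comm]

theorem mem_pvCombB (s : PySem.Set Int) (s1 s2 : List Int) (x : Int) :
    x ∈ pvCombB s s1 s2 ↔ x ∈ s ∨ ∃ a ∈ s1, ∃ b ∈ s2, pvP a b x := by
  unfold pvCombB
  induction s1 generalizing s with
  | nil => simp
  | cons a t ih =>
    simp only [List.foldl_cons, ih, mem_innerB, List.mem_cons]
    constructor
    · rintro ((h | h) | h)
      · exact Or.inl h
      · exact Or.inr ⟨a, Or.inl rfl, h.choose, h.choose_spec⟩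
      · obtain ⟨a', ha', rest⟩ := h
        exact Or.inr ⟨a', Or.inr ha', rest⟩
    · rintro (h | ⟨a', (rfl | ha'), rest⟩)
      · exact Or.inl (Or.inl h)
      · exact Or.inl (Or.inr rest)
      · exact Or.inr ⟨a', ha', rest⟩

theorem mem_foldl_comb {α : Type} (f : PySem.Set Int → α → PySem.Set Int)
    (Q : α → Int → Prop)
    (hf : ∀ s j x, x ∈ f s j ↔ x ∈ s ∨ Q j x)
    (l : List α) (s : PySem.Set Int) (x : Int) :
    x ∈ l.foldl f s ↔ x ∈ s ∨ ∃ j ∈ l, Q j x := by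
  induction l generalizing s with
  | nil => simp
  | cons j t ih =>
    simp only [List.foldl_cons, ih, hf, List.mem_cons]
    constructor
    · rintro ((h | h) | ⟨j', hj', hq⟩)
      · exact Or.inl h
      · exact Or.inr ⟨j, ⟨Or.inl rfl, h⟩⟩
      · exact Or.inr ⟨j', ⟨Or.inr hj', hq⟩⟩
    · rintro (h | ⟨j', (rfl | hj'), hq⟩)
      · exact Or.inl (Or.inl h)
      · exact Or.inl (Or.inr hq)
      · exact Or.inr ⟨j', ⟨hj', hq⟩⟩

theorem foldl_find (test : Int → Bool) (l : List Int) :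
    l.foldl (fun (r : Option Int) k =>
      match r with
      | some r => some r
      | none => if test k then some k else none) none = l.find? test := by
  have keep : ∀ (l : List Int) (v : Int),
      l.foldl (fun (r : Option Int) k =>
        match r with
        | some r => some r
        | none => if test k then some k else none) (some v) = some v := by
    intro l v; induction l with
    | nil => rfl
    | cons a t ih => simpa using ih
  induction l with
  | nil => rfl
  | cons a t ih =>
    simp only [List.foldl_cons, List.find?_cons]
    by_cases h : test a <;> simp [h, keep, ih]

-- proof-side mirror of the single row A builds in iteration i
def pvRow (N : Int) : Nat → PySem.Set Int
  | 0 => PySem.Set.empty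
  | 1 => PySem.Set.add PySem.Set.empty N
  | k + 2 =>
    (PySem.List.pyRange 1 ((k : Int) + 2) 1).attach.foldl
      (fun s j => pvCombA s (pvRow N j.1.toNat) (pvRow N (k + 2 - j.1.toNat)))
      (PySem.Set.add PySem.Set.empty (pvRep N ((k : Int) + 2)))
  termination_by k => k
  decreasing_by
  · have := j.2; rw [PySem.List.mem_pyRange_one] at this; omega
  · have := j.2; rw [PySem.List.mem_pyRange_one] at this; omega

theorem mem_pvReach_two (N : Int) (k : Nat) (x : Int) :
    x ∈ pvReach N (k + 2) ↔ x = pvRep N ((k : Int) + 2) ∨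
      ∃ j ∈ List.range' 1 (k + 1), ∃ a ∈ pvReach N j, ∃ b ∈ pvReach N (k + 2 - j), pvP a b x := by
  rw [pvReach, mem_foldl_comb _ (fun j x => ∃ a ∈ pvReach N j.1, ∃ b ∈ pvReach N (k + 2 - j.1), pvP a b x)
      (fun s j x => mem_pvCombB s _ _ x)]
  simp [PySem.Set.empty]

theorem mem_pvRow_two (N : Int) (k : Nat) (x : Int) :
    x ∈ pvRow N (k + 2) ↔ x = pvRep N ((k : Int) + 2) ∨
      ∃ j ∈ PySem.List.pyRange 1 ((k : Int) + 2) 1,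
        ∃ a ∈ pvRow N j.toNat, ∃ b ∈ pvRow N (k + 2 - j.toNat), pvP a b x := by
  rw [pvRow, mem_foldl_comb _ (fun j x => ∃ a ∈ pvRow N (j.1).toNat, ∃ b ∈ pvRow N (k + 2 - (j.1).toNat), pvP a b x)
      (fun s j x => mem_pvCombA s _ _ x)]
  simp [PySem.Set.empty]

theorem memEq (N : Int) : ∀ (k : Nat) (x : Int), x ∈ pvRow N k ↔ x ∈ pvReach N k := by
  intro k
  induction k using Nat.strong_induction_on with
  | _ k ih =>
    match k with
    | 0 => intro x; rw [pvRow, pvReach]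
    | 1 => intro x; rw [pvRow, pvReach]
    | k + 2 =>
      intro x
      rw [mem_pvRow_two, mem_pvReach_two]
      constructor
      · rintro (h | ⟨j, hj, a, ha, b, hb, hp⟩)
        · exact Or.inl h
        · rw [PySem.List.mem_pyRange_one] at hj
          refine Or.inr ⟨j.toNat, ?_, a, ?_, b, ?_, hp⟩
          · rw [List.mem_range'_1]; omega
          · exact (ih j.toNat (by omega) a).mp ha
          · exact (ih (k + 2 - j.toNat) (by omega) b).mp hb
      · rintro (h | ⟨j, hj, a, ha, b, hb, hp⟩)
        · exact Or.inl h
        · rw [List.mem_range'_1] at hj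
          refine Or.inr ⟨(j : Int), ?_, a, ?_, b, ?_, hp⟩
          · rw [PySem.List.mem_pyRange_one]; omega
          · simpa using (ih j (by omega) a).mpr ha
          · simpa using (ih (k + 2 - j) (by omega) b).mpr hb

theorem pvRow_eq_plain (N : Int) (k : Nat) :
    pvRow N (k + 2) = (PySem.List.pyRange 1 ((k : Int) + 2) 1).foldl
      (fun s j => pvCombA s (pvRow N j.toNat) (pvRow N (k + 2 - j.toNat)))
      (PySem.Set.add PySem.Set.empty (pvRep N ((k : Int) + 2))) := by
  rw [pvRow]
  exact List.foldl_attach (f := fun (s : PySem.Set Int) (j : Int) => pvCombA s (pvRow N j.toNat) (pvRow N (k + 2 - j.toNat)))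

-- the dp table after iterations 2..m have been performed
def pvDpL (N : Int) (m : Nat) : List (PySem.Set Int) :=
  (List.range 9).map (fun t => if 1 ≤ t ∧ t ≤ m then pvRow N t else PySem.Set.empty)

theorem pvDpL_length (N : Int) (m : Nat) : (pvDpL N m).length = 9 := by
  simp [pvDpL]

theorem pvDpL_get (N : Int) (m : Nat) (j : Int) (h0 : 0 ≤ j) (h9 : j < 9) :
    PySem.List.pyGetD (pvDpL N m) j PySem.Set.empty =
      if 1 ≤ j.toNat ∧ j.toNat ≤ m then pvRow N j.toNat else PySem.Set.empty := by
  rw [PySem.List.pyGetD_eq_getElem _ _ h0 (by rw [pvDpL_length]; omega)]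
  simp [pvDpL]

theorem pvDpL_set (N : Int) (m : Nat) (hm : m + 1 < 9) :
    PySem.List.pySetD (pvDpL N m) ((m : Int) + 1) (pvRow N (m + 1)) = pvDpL N (m + 1) := by
  rw [PySem.List.pySetD_of_nonneg _ _ (by omega)]
  apply List.ext_getElem
  · simp [pvDpL]
  · intro t h1 h2
    rw [List.getElem_set]
    by_cases ht : t = m + 1
    · subst ht
      simp only [pvDpL, List.getElem_map, List.getElem_range] at *
      simp
    · have ht' : ¬ (((m : Int) + 1).toNat = t) := by omega
      simp only [ht', ite_false]
      simp only [pvDpL, List.getElem_map, List.getElem_range]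
      have : (1 ≤ t ∧ t ≤ m) ↔ (1 ≤ t ∧ t ≤ m + 1) := by omega
      simp [this]

-- A's loop body, named so the loop lemmas can speak about it (definitionally equal to the
-- lambda inside solution)
def pvStepA (N number : Int) (st : List (PySem.Set Int) × Option Int) (i : Int) :
    List (PySem.Set Int) × Option Int :=
  match st with
  | (dp, some r) => (dp, some r)
  | (dp, none) =>
    let si := PySem.Set.add (PySem.List.pyGetD dp i PySem.Set.empty) (pvRep N i)
    let si := (PySem.List.pyRange 1 i 1).foldl
      (fun si j => pvCombA si (PySem.List.pyGetD dp j PySem.Set.empty)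
                              (PySem.List.pyGetD dp (i - j) PySem.Set.empty)) si
    let dp := PySem.List.pySetD dp i si
    if PySem.Set.contains (PySem.List.pyGetD dp i PySem.Set.empty) number
    then (dp, some i) else (dp, none)

theorem keepA (N number : Int) : ∀ (l : List Int) (dp : List (PySem.Set Int)) (r : Int),
    l.foldl (pvStepA N number) (dp, some r) = (dp, some r) := by
  intro l
  induction l with
  | nil => intro dp r; rfl
  | cons a t ih => intro dp r; simpa [List.foldl_cons, pvStepA] using ih dp r

theorem stepA_none (N number : Int) (m : Nat) (i : Int)
    (hi : i = (m : Int) + 1) (h2 : 2 ≤ i) (h9 : i < 9) :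
    pvStepA N number (pvDpL N m, none) i =
      (pvDpL N (m + 1),
       if PySem.Set.contains (pvRow N (m + 1)) number then some i else none) := by
  have hm1 : 1 ≤ m := by omega
  have hget_i : PySem.List.pyGetD (pvDpL N m) i PySem.Set.empty = PySem.Set.empty := by
    rw [pvDpL_get N m i (by omega) h9]
    simp only [ite_eq_right_iff]
    intro h; exfalso; omega
  have hfold : (PySem.List.pyRange 1 i 1).foldl
      (fun si j => pvCombA si (PySem.List.pyGetD (pvDpL N m) j PySem.Set.empty)
                              (PySem.List.pyGetD (pvDpL N m) (i - j) PySem.Set.empty))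
      (PySem.Set.add PySem.Set.empty (pvRep N i))
      = pvRow N (m + 1) := by
    have hk : m + 1 = (m - 1) + 2 := by omega
    have hki : ((m - 1 : Nat) : Int) + 2 = i := by omega
    rw [PySem.List.foldl_congr_mem
      (g := fun si j => pvCombA si (pvRow N j.toNat) (pvRow N ((m - 1) + 2 - j.toNat)))]
    · rw [hk, pvRow_eq_plain, hki]
    · intro acc j hj
      rw [PySem.List.mem_pyRange_one] at hj
      rw [pvDpL_get N m j (by omega) (by omega),
          pvDpL_get N m (i - j) (by omega) (by omega)]
      have c1 : 1 ≤ j.toNat ∧ j.toNat ≤ m := by omega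
      have c2 : 1 ≤ (i - j).toNat ∧ (i - j).toNat ≤ m := by omega
      have c3 : (i - j).toNat = (m - 1) + 2 - j.toNat := by omega
      rw [if_pos c1, if_pos c2, c3]
  show (let si := PySem.Set.add (PySem.List.pyGetD (pvDpL N m) i PySem.Set.empty) (pvRep N i)
        let si := (PySem.List.pyRange 1 i 1).foldl
          (fun si j => pvCombA si (PySem.List.pyGetD (pvDpL N m) j PySem.Set.empty)
                                  (PySem.List.pyGetD (pvDpL N m) (i - j) PySem.Set.empty)) si
        let dp := PySem.List.pySetD (pvDpL N m) i si
        if PySem.Set.contains (PySem.List.pyGetD dp i PySem.Set.empty) number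
        then (dp, some i) else (dp, none)) = _
  simp only [hget_i, hfold]
  have hset : PySem.List.pySetD (pvDpL N m) i (pvRow N (m + 1)) = pvDpL N (m + 1) := by
    rw [hi]; exact pvDpL_set N m (by omega)
  rw [hset]
  have hget' : PySem.List.pyGetD (pvDpL N (m + 1)) i PySem.Set.empty = pvRow N (m + 1) := by
    rw [pvDpL_get N (m + 1) i (by omega) h9, if_pos (by omega)]
    congr 1
    omega
  rw [hget']
  split <;> rfl

theorem loopA (N number : Int) : ∀ (n : Nat) (i : Int), i = 9 - (n : Int) → 2 ≤ i →
    ((PySem.List.pyRange i 9 1).foldl (pvStepA N number) (pvDpL N (i - 1).toNat, none)).2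
    = (PySem.List.pyRange i 9 1).find?
        (fun k => PySem.Set.contains (pvRow N k.toNat) number) := by
  intro n
  induction n with
  | zero =>
    intro i hi h2
    rw [PySem.List.pyRange_one_eq_nil (by omega)]
    rfl
  | succ n ih =>
    intro i hi h2
    have h9 : i < 9 := by omega
    rw [PySem.List.pyRange_one_cons (by omega)]
    rw [List.foldl_cons]
    have hm : i = (((i - 1).toNat : Nat) : Int) + 1 := by omega
    rw [stepA_none N number (i - 1).toNat i hm h2 h9]
    have hnat : (i - 1).toNat + 1 = i.toNat := by omega
    by_cases h : PySem.Set.contains (pvRow N ((i - 1).toNat + 1)) number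
    · rw [if_pos h, keepA]
      rw [List.find?_cons_of_pos (by rw [← hnat]; exact h)]
    · rw [if_neg h]
      have hstate : (i + 1 - 1).toNat = (i - 1).toNat + 1 := by omega
      rw [List.find?_cons_of_neg (by rw [← hnat]; simpa using h)]
      have := ih (i + 1) (by omega) (by omega)
      rw [hstate] at this
      exact this

theorem contains_congr (number : Int) (s t : PySem.Set Int) (h : ∀ y, y ∈ s ↔ y ∈ t) :
    PySem.Set.contains s number = PySem.Set.contains t number := by
  by_cases hx : number ∈ s
  · rw [(PySem.Set.contains_iff s number).mpr hx, (PySem.Set.contains_iff t number).mpr ((h number).mp hx)]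
  · have hx' : number ∉ t := fun hc => hx ((h number).mpr hc)
    rw [Bool.eq_iff_iff]
    constructor
    · intro hc; exact absurd ((PySem.Set.contains_iff s number).mp hc) hx
    · intro hc; exact absurd ((PySem.Set.contains_iff t number).mp hc) hx'

theorem dp_init (N : Int) :
    PySem.List.pySetD (PySem.Set.empty :: List.replicate 8 (PySem.Set.empty : PySem.Set Int)) 1
      (PySem.Set.add (PySem.List.pyGetD
        (PySem.Set.empty :: List.replicate 8 (PySem.Set.empty : PySem.Set Int)) 1 PySem.Set.empty) N)
      = pvDpL N 1 := by
  have h1 : PySem.List.pyGetD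
      (PySem.Set.empty :: List.replicate 8 (PySem.Set.empty : PySem.Set Int)) 1 PySem.Set.empty
      = PySem.Set.empty := rfl
  rw [h1, PySem.List.pySetD_of_nonneg _ _ (by norm_num)]
  apply List.ext_getElem
  · simp [pvDpL]
  · intro t h1 h2
    simp only [List.length_set, List.length_cons, List.length_replicate] at h1
    rw [List.getElem_set]
    simp only [pvDpL, List.getElem_map, List.getElem_range]
    by_cases ht : t = 1
    · subst ht; simp [pvRow]
    · rw [if_neg (by omega), if_neg (by omega)]
      match t, h1 with
      | 0, _ => rfl
      | (n+1), h =>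
        have hn : n < 8 := by omega
        simp only [List.getElem_cons_succ]
        rw [List.getElem_replicate]

theorem main_eq (N number : Int) : solution N number = solution_alt N number := by
  have hrange : PySem.List.pyRange 1 9 1 = 1 :: PySem.List.pyRange 2 9 1 :=
    PySem.List.pyRange_one_cons (by norm_num)
  by_cases hNn : N = number
  · rw [solution, if_pos hNn, solution_alt, foldl_find, hrange,
      List.find?_cons_of_pos (by
        have h1 : number ∈ pvReach N (1 : Int).toNat := by
          show number ∈ pvReach N 1
          rw [pvReach]
          simp [hNn]
        simpa using (PySem.Set.contains_iff _ number).mpr h1)]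
  · have h1 : number ∉ pvReach N (1 : Int).toNat := by
      show number ∉ pvReach N 1
      rw [pvReach]
      simp [PySem.Set.empty]
      exact fun h => hNn h.symm
    rw [solution_alt, foldl_find, hrange,
      List.find?_cons_of_neg (by
        simp only [Bool.not_eq_true]
        exact (Bool.not_eq_true _).mp
          (fun hc => h1 ((PySem.Set.contains_iff _ number).mp hc)))]
    rw [solution, if_neg hNn]
    simp only [dp_init]
    have hstep : (fun (st : List (PySem.Set Int) × Option Int) (i : Int) =>
        match st with
        | (dp, some r) => (dp, some r)
        | (dp, none) =>
          let si := PySem.Set.add (PySem.List.pyGetD dp i PySem.Set.empty) (pvRep N i)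
          let si := (PySem.List.pyRange 1 i 1).foldl
            (fun si j => pvCombA si (PySem.List.pyGetD dp j PySem.Set.empty)
                                    (PySem.List.pyGetD dp (i - j) PySem.Set.empty)) si
          let dp := PySem.List.pySetD dp i si
          if PySem.Set.contains (PySem.List.pyGetD dp i PySem.Set.empty) number
          then (dp, some i) else (dp, none)) = pvStepA N number := rfl
    rw [hstep]
    have hl := loopA N number 7 2 (by norm_num) (by norm_num)
    have e : ((2 : Int) - 1).toNat = 1 := rfl
    rw [e] at hl
    rw [hl]
    have htest : (fun (k : Int) => PySem.Set.contains (pvRow N k.toNat) number)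
        = (fun (k : Int) => PySem.Set.contains (pvReach N k.toNat) number) :=
      funext fun k => contains_congr number _ _ (memEq N k.toNat)
    rw [htest]

-- ===== VERDICT (by name: the statement is the Claim_ definition above) =====
theorem solution_spec : Claim_equal_solution := by
  intro N number _hDom _hPre
  unfold Spec_solution
  exact main_eq N number
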